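-- pv_equiv track=rewrite | github.com/AlanRuskin6/Memory3 | src/memory/server.py | _split_large_block
-- ===== SOURCE A (Python) =====
-- def _split_large_block(block: str, chunk_size: int) -> list[str]:
--     """Split an oversized code block by line groups."""
--     lines = block.split("\n")
--     chunks = []
--     current_lines = []
--     current_len = 0
--
--     for line in lines:
--         if current_len + len(line) + 1 > chunk_size and current_lines:
--             chunks.append("\n".join(current_lines).strip())
--             current_lines = []
--             current_len = 0
--         current_lines.append(line)
--         current_len += len(line) + 1
--
--     if current_lines:
--         text = "\n".join(current_lines).strip()
--         if text:
--             chunks.append(text)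
--
--     return chunks
-- ===== SOURCE B (Python) =====
-- def _split_large_block(block: str, chunk_size: int) -> list[str]:
--     """Split an oversized code block by line groups.
--
--     Different algorithm: build prefix sums of line lengths (+1 for the
--     newline), then find each group boundary by binary search on the prefix
--     sums instead of accumulating a running length line by line; finally
--     render the slices (intermediate groups unconditionally, the last one
--     only if non-empty after stripping).
--     """
--     lines = block.split("\n")
--     n = len(lines)
--     prefix = [0]
--     for ln in lines:
--         prefix.append(prefix[-1] + len(ln) + 1)
--     bounds = [0]
--     i = 0
--     while i < n:
--         limit = prefix[i] + chunk_size
--         lo = i + 1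
--         hi = n
--         while lo < hi:
--             mid = (lo + hi + 1) // 2
--             if prefix[mid] <= limit:
--                 lo = mid
--             else:
--                 hi = mid - 1
--         bounds.append(lo)
--         i = lo
--     groups = [lines[bounds[k]:bounds[k + 1]] for k in range(len(bounds) - 1)]
--     out = ["\n".join(g).strip() for g in groups[:-1]]
--     last = "\n".join(groups[-1]).strip()
--     if last:
--         out.append(last)
--     return out
-- ===== Notes on version B (the rewrite author's own statement) =====
-- stated objective: alternative
-- what changed: B replaces A's single greedy pass with a running length accumulator by prefix sums of the line lengths plus a hand-written binary search that jumps directly to each group boundary, then renders the slices in a separate pass (intermediate groups unconditionally, the final group only if non-empty after stripping).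
import Mathlib
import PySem

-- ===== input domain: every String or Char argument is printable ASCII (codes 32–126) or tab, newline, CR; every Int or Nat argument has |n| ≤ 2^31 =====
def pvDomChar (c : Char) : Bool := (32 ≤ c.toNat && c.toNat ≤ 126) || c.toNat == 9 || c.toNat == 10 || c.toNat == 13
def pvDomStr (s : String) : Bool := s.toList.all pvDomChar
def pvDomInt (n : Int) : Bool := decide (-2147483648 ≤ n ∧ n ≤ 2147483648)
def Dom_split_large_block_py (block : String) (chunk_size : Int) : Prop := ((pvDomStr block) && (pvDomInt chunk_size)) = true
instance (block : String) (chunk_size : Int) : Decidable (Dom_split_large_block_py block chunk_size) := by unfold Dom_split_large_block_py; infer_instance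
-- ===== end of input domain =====

-- B finds each group boundary by binary search on prefix sums of line lengths instead of A's
-- line-by-line greedy accumulation, and renders the slices in a separate pass; same return value.

-- ===== PORT A =====
def split_large_block_py (block : String) (chunk_size : Int) : List String :=
  let lines := (PySem.Str.split? block "\n").getD []
  let st := lines.foldl (fun (st : List String × List String × Int) line =>
      let st := if st.2.2 + PySem.Str.len line + 1 > chunk_size ∧ st.2.1 ≠ [] then
          (st.1 ++ [PySem.Str.strip (PySem.Str.join "\n" st.2.1)], ([] : List String), (0 : Int))
        else st
      (st.1, st.2.1 ++ [line], st.2.2 + PySem.Str.len line + 1))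
    ([], [], 0)
  if st.2.1 ≠ [] then
    let text := PySem.Str.strip (PySem.Str.join "\n" st.2.1)
    if text ≠ "" then st.1 ++ [text] else st.1
  else st.1

-- ===== PORT B =====
-- '"\n".join(g).strip()' (Source B uses it twice)
def pvRender (g : List String) : String := PySem.Str.strip (PySem.Str.join "\n" g)

-- prefix = [0]; for ln in lines: prefix.append(prefix[-1] + len(ln) + 1)   (prefix[-1] always in range)
def pvPrefix (lines : List String) : List Int :=
  lines.foldl (fun p ln => p ++ [PySem.List.pyGetD p (-1) 0 + PySem.Str.len ln + 1]) [0]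

-- mid = (lo + hi + 1) // 2
def pvMid (lo hi : Int) : Int := PySem.Int.floordiv (lo + hi + 1) 2

-- the inner 'while lo < hi' binary-search loop of Source B; the structural fuel (= the interval
-- size at the call) is only a totality guard: with fuel >= hi - lo the 0-case is never reached.
-- prefix[mid] is always in range.
def pvBSearchGo (p : List Int) (limit : Int) : Nat → Int → Int → Int
  | 0, lo, _ => lo
  | fuel + 1, lo, hi =>
    if lo < hi then
      if PySem.List.pyGetD p (pvMid lo hi) 0 ≤ limit then pvBSearchGo p limit fuel (pvMid lo hi) hi
      else pvBSearchGo p limit fuel lo (pvMid lo hi - 1)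
    else lo

def pvBSearch (p : List Int) (limit lo hi : Int) : Int :=
  pvBSearchGo p limit (hi - lo).toNat lo hi

-- the outer 'while i < n' loop of Source B: the group boundaries appended after the initial 0
-- (again the structural fuel, the remaining index range, is only a totality guard)
def pvBoundsGo (p : List Int) (cs n : Int) : Nat → Int → List Int
  | 0, _ => []
  | fuel + 1, i =>
    if i < n then
      pvBSearch p (PySem.List.pyGetD p i 0 + cs) (i + 1) n
        :: pvBoundsGo p cs n fuel (pvBSearch p (PySem.List.pyGetD p i 0 + cs) (i + 1) n)
    else []

def pvBoundsLoop (p : List Int) (cs n i : Int) : List Int :=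
  pvBoundsGo p cs n (n - i).toNat i

def split_large_block_py_alt (block : String) (chunk_size : Int) : List String :=
  let lines := (PySem.Str.split? block "\n").getD []
  let n : Int := lines.length
  let pre := pvPrefix lines
  let bounds := 0 :: pvBoundsLoop pre chunk_size n 0
  let groups := (PySem.List.pyRange 0 ((bounds.length : Int) - 1) 1).map
      (fun k => PySem.List.slice lines (some (PySem.List.pyGetD bounds k 0))
        (some (PySem.List.pyGetD bounds (k + 1) 0)))
  let out := (PySem.List.slice groups none (some (-1))).map pvRender
  let last := pvRender (PySem.List.pyGetD groups (-1) [])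
  if last ≠ "" then out ++ [last] else out

-- ===== PRECONDITION & SPEC =====
def Spec_split_large_block_py (block : String) (chunk_size : Int) (out : List String) : Prop := out = split_large_block_py_alt block chunk_size
instance (block : String) (chunk_size : Int) (out : List String) : Decidable (Spec_split_large_block_py block chunk_size out) := by unfold Spec_split_large_block_py; infer_instance

-- ===== CLAIM (what is proved, stated in full; the proofs are below) =====
def Claim_equal_split_large_block_py : Prop := ∀ (block : String) (chunk_size : Int), Dom_split_large_block_py block chunk_size → Spec_split_large_block_py block chunk_size (split_large_block_py block chunk_size)

-- ===== LEMMAS AND PROOFS =====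

theorem pvMid_bounds (lo hi : Int) (h : lo < hi) : lo + 1 ≤ pvMid lo hi ∧ pvMid lo hi ≤ hi := by
  have h2 := PySem.Int.floordiv_two_mid_bounds (lo := lo + 1) (hi := hi) (by omega)
  simpa [pvMid, show lo + hi + 1 = lo + 1 + hi from by ring] using h2

-- for ANY fuel the search stays inside [lo, hi]
theorem pvBSearchGo_bounds (p : List Int) (limit : Int) : ∀ (fuel : Nat) (lo hi : Int),
    lo ≤ hi → lo ≤ pvBSearchGo p limit fuel lo hi ∧ pvBSearchGo p limit fuel lo hi ≤ hi := by
  intro fuel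
  induction fuel with
  | zero => intro lo hi hle; simp only [pvBSearchGo]; omega
  | succ fuel ih =>
    intro lo hi hle
    by_cases h : lo < hi
    · simp only [pvBSearchGo, if_pos h]
      have hmid := pvMid_bounds lo hi h
      split
      · have := ih (pvMid lo hi) hi (by omega); omega
      · have := ih lo (pvMid lo hi - 1) (by omega); omega
    · simp only [pvBSearchGo, if_neg h]; omega

theorem pvBSearch_bounds (p : List Int) (limit lo hi : Int) (hle : lo ≤ hi) :
    lo ≤ pvBSearch p limit lo hi ∧ pvBSearch p limit lo hi ≤ hi :=
  pvBSearchGo_bounds p limit (hi - lo).toNat lo hi hle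

-- with enough fuel the search returns the largest index in [lo, hi] whose prefix value fits
-- (lo if none fits)
theorem pvBSearchGo_max (p : List Int) (limit : Int)
    (mono : ∀ a b : Int, 0 ≤ a → a ≤ b → b < (p.length : Int) →
      PySem.List.pyGetD p a 0 ≤ PySem.List.pyGetD p b 0) :
    ∀ (fuel : Nat) (lo hi : Int), (hi - lo).toNat ≤ fuel → 0 ≤ lo → lo ≤ hi → hi < (p.length : Int) →
      (∀ t : Int, lo < t → t ≤ hi → PySem.List.pyGetD p t 0 ≤ limit → t ≤ pvBSearchGo p limit fuel lo hi)
      ∧ (lo < pvBSearchGo p limit fuel lo hi → PySem.List.pyGetD p (pvBSearchGo p limit fuel lo hi) 0 ≤ limit) := by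
  intro fuel
  induction fuel with
  | zero =>
    intro lo hi hf h0 hle hlen
    simp only [pvBSearchGo]
    constructor
    · intro t ht1 ht2 _; omega
    · intro hlt; omega
  | succ fuel ih =>
    intro lo hi hf h0 hle hlen
    by_cases h : lo < hi
    · simp only [pvBSearchGo, if_pos h]
      have hmid := pvMid_bounds lo hi h
      split
      · rename_i hfit
        have hb := pvBSearchGo_bounds p limit fuel (pvMid lo hi) hi (by omega)
        have := ih (pvMid lo hi) hi (by omega) (by omega) (by omega) hlen
        constructor
        · intro t ht1 ht2 ht3
          by_cases hcm : t ≤ pvMid lo hi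
          · omega
          · exact this.1 t (by omega) ht2 ht3
        · intro _
          by_cases heq : pvMid lo hi < pvBSearchGo p limit fuel (pvMid lo hi) hi
          · exact this.2 heq
          · have : pvBSearchGo p limit fuel (pvMid lo hi) hi = pvMid lo hi := by omega
            rw [this]; exact hfit
      · rename_i hbig
        have hb := pvBSearchGo_bounds p limit fuel lo (pvMid lo hi - 1) (by omega)
        have := ih lo (pvMid lo hi - 1) (by omega) h0 (by omega) (by omega)
        constructor
        · intro t ht1 ht2 ht3
          by_cases hcm : t ≤ pvMid lo hi - 1
          · exact this.1 t ht1 hcm ht3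
          · exfalso
            have hmt : PySem.List.pyGetD p (pvMid lo hi) 0 ≤ PySem.List.pyGetD p t 0 :=
              mono (pvMid lo hi) t (by omega) (by omega) (by omega)
            omega
        · exact this.2
    · simp only [pvBSearchGo, if_neg h]
      constructor
      · intro t ht1 ht2 _; omega
      · intro hlt; omega

theorem pvBSearch_max (p : List Int) (limit : Int)
    (mono : ∀ a b : Int, 0 ≤ a → a ≤ b → b < (p.length : Int) →
      PySem.List.pyGetD p a 0 ≤ PySem.List.pyGetD p b 0)
    (lo hi : Int) (h0 : 0 ≤ lo) (hle : lo ≤ hi) (hlen : hi < (p.length : Int)) :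
    (∀ t : Int, lo < t → t ≤ hi → PySem.List.pyGetD p t 0 ≤ limit → t ≤ pvBSearch p limit lo hi)
    ∧ (lo < pvBSearch p limit lo hi → PySem.List.pyGetD p (pvBSearch p limit lo hi) 0 ≤ limit) :=
  pvBSearchGo_max p limit mono (hi - lo).toNat lo hi le_rfl h0 hle hlen

theorem pvBoundsGo_stop (p : List Int) (cs n : Int) : ∀ (fuel : Nat) (i : Int),
    ¬ i < n → pvBoundsGo p cs n fuel i = [] := by
  intro fuel i h
  cases fuel with
  | zero => rfl
  | succ fuel => simp only [pvBoundsGo, if_neg h]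

-- any fuel at least the remaining range gives the same boundary list
theorem pvBoundsGo_irrel (p : List Int) (cs n : Int) : ∀ (f1 f2 : Nat) (i : Int),
    (n - i).toNat ≤ f1 → (n - i).toNat ≤ f2 → pvBoundsGo p cs n f1 i = pvBoundsGo p cs n f2 i := by
  intro f1
  induction f1 with
  | zero =>
    intro f2 i h1 h2
    rw [pvBoundsGo_stop p cs n 0 i (by omega), pvBoundsGo_stop p cs n f2 i (by omega)]
  | succ f1 ih =>
    intro f2 i h1 h2
    by_cases h : i < n
    · cases f2 with
      | zero => omega
      | succ f2 =>
        simp only [pvBoundsGo, if_pos h]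
        have hj := pvBSearch_bounds p (PySem.List.pyGetD p i 0 + cs) (i + 1) n (by omega)
        rw [ih f2 (pvBSearch p (PySem.List.pyGetD p i 0 + cs) (i + 1) n) (by omega) (by omega)]
    · rw [pvBoundsGo_stop p cs n (f1 + 1) i h, pvBoundsGo_stop p cs n f2 i h]

-- the loop unfolds one step at a time
theorem pvBoundsLoop_eq (p : List Int) (cs n i : Int) :
    pvBoundsLoop p cs n i
      = if i < n then
          pvBSearch p (PySem.List.pyGetD p i 0 + cs) (i + 1) n
            :: pvBoundsLoop p cs n (pvBSearch p (PySem.List.pyGetD p i 0 + cs) (i + 1) n)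
        else [] := by
  unfold pvBoundsLoop
  by_cases h : i < n
  · rw [if_pos h]
    have hsz : (n - i).toNat = ((n - i).toNat - 1) + 1 := by omega
    rw [hsz]
    simp only [pvBoundsGo, if_pos h]
    have hj := pvBSearch_bounds p (PySem.List.pyGetD p i 0 + cs) (i + 1) n (by omega)
    rw [pvBoundsGo_irrel p cs n ((n - i).toNat - 1)
      ((n - pvBSearch p (PySem.List.pyGetD p i 0 + cs) (i + 1) n).toNat)
      (pvBSearch p (PySem.List.pyGetD p i 0 + cs) (i + 1) n) (by omega) (by omega)]
  · rw [if_neg h, pvBoundsGo_stop p cs n (n - i).toNat i h]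

-- length of a line plus the newline
def pvL (l : String) : Int := PySem.Str.len l + 1

-- sum of pvL over the first k lines (what prefix[k] holds)
def pvS (ls : List String) (k : Nat) : Int := ((ls.take k).map pvL).sum

theorem pvL_pos (l : String) : 0 < pvL l := by
  simp only [pvL, PySem.Str.len_eq]; omega

theorem pvS_succ (ls : List String) (k : Nat) (h : k < ls.length) :
    pvS ls (k + 1) = pvS ls k + pvL ls[k] := by
  have ht : ls.take (k + 1) = ls.take k ++ [ls[k]] := by
    rw [List.take_add_one, List.getElem?_eq_getElem h]; rfl
  simp only [pvS, ht, List.map_append, List.sum_append, List.map_cons, List.map_nil,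
    List.sum_cons, List.sum_nil, add_zero]

theorem pvS_mono (ls : List String) (a b : Nat) (hab : a ≤ b) : pvS ls a ≤ pvS ls b := by
  have hsplit : ls.take b = ls.take a ++ (ls.take b).drop a := by
    conv_lhs => rw [← List.take_append_drop a (ls.take b)]
    rw [List.take_take, Nat.min_eq_left hab]
  unfold pvS
  rw [hsplit]
  simp only [List.map_append, List.sum_append, le_add_iff_nonneg_right]
  apply List.sum_nonneg
  intro x hx
  obtain ⟨y, -, rfl⟩ := List.mem_map.1 hx
  exact (pvL_pos y).le

theorem pvPrefix_eq (ls : List String) :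
    pvPrefix ls = (List.range (ls.length + 1)).map (pvS ls) := by
  induction ls using List.reverseRecOn with
  | nil => rfl
  | append_singleton ls l ih =>
    unfold pvPrefix at ih ⊢
    rw [List.foldl_append, ih]
    have hlast : (List.range (ls.length + 1)).map (pvS ls)
        = (List.range ls.length).map (pvS ls) ++ [pvS ls ls.length] := by
      rw [show ls.length + 1 = (ls.length).succ from rfl, List.range_succ, List.map_append]; rfl
    have hmapeq : ∀ (m : Nat), m ≤ ls.length + 1 →
        (List.range m).map (pvS (ls ++ [l])) = (List.range m).map (pvS ls) := by
      intro m hm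
      apply List.map_congr_left
      intro k hk
      have hk' : k ≤ ls.length := by
        have := List.mem_range.1 hk; omega
      unfold pvS
      rw [List.take_append_of_le_length hk']
    have hfull : pvS (ls ++ [l]) (ls.length + 1) = pvS ls ls.length + (PySem.Str.len l + 1) := by
      unfold pvS
      rw [List.take_of_length_le (by simp), List.take_of_length_le (by omega)]
      simp [pvL]
    simp only [List.foldl_cons, List.foldl_nil]
    rw [hlast, PySem.List.pyGetD_neg_one_append_singleton]
    rw [show (ls ++ [l]).length + 1 = ((ls ++ [l]).length).succ from rfl, List.range_succ,
      List.map_append]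
    rw [List.length_append]
    simp only [List.length_cons, List.length_nil]
    rw [hmapeq (ls.length + 1) (by omega), hlast]
    simp only [List.map_cons, List.map_nil, zero_add]
    rw [hfull]
    simp [add_assoc]

theorem pvPrefix_get (ls : List String) (k : Nat) (h : k ≤ ls.length) :
    PySem.List.pyGetD (pvPrefix ls) (k : Int) 0 = pvS ls k := by
  rw [pvPrefix_eq, PySem.List.pyGetD_natCast]
  exact PySem.List.getD_map_range (pvS ls) (ls.length + 1) k 0 (by omega)

theorem pvPrefix_len (ls : List String) : (pvPrefix ls).length = ls.length + 1 := by
  simp [pvPrefix_eq]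

-- A's fold at the level of line GROUPS (rendering postponed)
def pvGFstep (cs : Int) (st : List (List String) × List String × Int) (line : String) :
    List (List String) × List String × Int :=
  let st := if st.2.1 ≠ [] ∧ st.2.2 + PySem.Str.len line + 1 > cs then
      (st.1 ++ [st.2.1], ([] : List String), (0 : Int))
    else st
  (st.1, st.2.1 ++ [line], st.2.2 + PySem.Str.len line + 1)

-- A's fold state is the render-image of the group-level fold state
theorem pv_fold_rel (cs : Int) (lines : List String) :
    ∀ (gs : List (List String)) (cur : List String) (n : Int),
      lines.foldl (fun (st : List String × List String × Int) line =>
          let st := if st.2.2 + PySem.Str.len line + 1 > cs ∧ st.2.1 ≠ [] then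
              (st.1 ++ [PySem.Str.strip (PySem.Str.join "\n" st.2.1)], ([] : List String), (0 : Int))
            else st
          (st.1, st.2.1 ++ [line], st.2.2 + PySem.Str.len line + 1))
        (gs.map pvRender, cur, n)
      =
      (fun (st : List (List String) × List String × Int) => (st.1.map pvRender, st.2.1, st.2.2))
        (lines.foldl (pvGFstep cs) (gs, cur, n)) := by
  induction lines with
  | nil => intro gs cur n; rfl
  | cons line rest ih =>
    intro gs cur n
    simp only [List.foldl_cons, pvGFstep]
    by_cases hB : cur ≠ [] ∧ n + PySem.Str.len line + 1 > cs
    · have hA : (n + PySem.Str.len line + 1 > cs ∧ cur ≠ []) := ⟨hB.2, hB.1⟩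
      simp only [if_pos hA, if_pos hB]
      have := ih (gs ++ [cur]) [line] (0 + PySem.Str.len line + 1)
      simpa [pvRender] using this
    · have hA : ¬(n + PySem.Str.len line + 1 > cs ∧ cur ≠ []) := fun h => hB ⟨h.2, h.1⟩
      simp only [if_neg hA, if_neg hB]
      exact ih gs (cur ++ [line]) (n + PySem.Str.len line + 1)

-- the group-level fold written as a recursion on the remaining lines
def pvCont (cs : Int) : List String → List String → Int → List (List String)
  | [], cur, _ => [cur]
  | l :: rest, cur, n =>
    if cur ≠ [] ∧ n + PySem.Str.len l + 1 > cs then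
      cur :: pvCont cs rest [l] (PySem.Str.len l + 1)
    else
      pvCont cs rest (cur ++ [l]) (n + PySem.Str.len l + 1)

theorem pvGF_cont (cs : Int) : ∀ (rest : List String) (gs : List (List String)) (cur : List String) (n : Int),
    (rest.foldl (pvGFstep cs) (gs, cur, n)).1 ++ [(rest.foldl (pvGFstep cs) (gs, cur, n)).2.1]
      = gs ++ pvCont cs rest cur n := by
  intro rest
  induction rest with
  | nil => intro gs cur n; simp [pvCont]
  | cons l r ih =>
    intro gs cur n
    simp only [List.foldl_cons, pvGFstep, pvCont]
    by_cases hc : cur ≠ [] ∧ n + PySem.Str.len l + 1 > cs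
    · simp only [if_pos hc]
      have := ih (gs ++ [cur]) [l] (PySem.Str.len l + 1)
      simpa using this
    · simp only [if_neg hc]
      exact ih gs (cur ++ [l]) (n + PySem.Str.len l + 1)

theorem pvGF_last_ne (cs : Int) : ∀ (rest : List String) (l : String) (gs : List (List String)) (cur : List String) (n : Int),
    ((l :: rest).foldl (pvGFstep cs) (gs, cur, n)).2.1 ≠ [] := by
  intro rest
  induction rest with
  | nil => intro l gs cur n; simp [pvGFstep]
  | cons l2 r ih =>
    intro l gs cur n
    simp only [List.foldl_cons] at *
    exact ih l2 _ _ _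

-- the slices of consecutive bound pairs (what Source B's comprehension computes)
def pvSlices (ls : List String) : List Int → List (List String)
  | a :: b :: t => PySem.List.slice ls (some a) (some b) :: pvSlices ls (b :: t)
  | _ => []

theorem pvSlices_map (ls : List String) : ∀ (b : List Int),
    (PySem.List.pyRange 0 ((b.length : Int) - 1) 1).map
      (fun k => PySem.List.slice ls (some (PySem.List.pyGetD b k 0))
        (some (PySem.List.pyGetD b (k + 1) 0)))
    = pvSlices ls b := by
  intro b
  induction b with
  | nil => simp [pvSlices, PySem.List.pyRange_one_eq_nil]
  | cons x t ih =>
    cases t with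
    | nil => simp [pvSlices, PySem.List.pyRange_one_eq_nil]
    | cons y t2 =>
      -- length - 1 = t2.length + 1 > 0
      rw [PySem.List.pyRange_one] at *
      have hlen : (((x :: y :: t2).length : Int) - 1 - 0).toNat = t2.length + 1 := by
        simp
      rw [hlen]
      rw [List.range_succ_eq_map]
      simp only [List.map_cons, List.map_map]
      show _ :: _ = pvSlices ls (x :: y :: t2)
      rw [show pvSlices ls (x :: y :: t2)
          = PySem.List.slice ls (some x) (some y) :: pvSlices ls (y :: t2) from rfl]
      congr 1
      · norm_num
        rw [PySem.List.pyGetD_ofNat']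
        rfl
      · rw [← ih]
        have hlen2 : (((y :: t2).length : Int) - 1 - 0).toNat = t2.length := by simp
        rw [hlen2, List.map_map]
        apply List.map_congr_left
        intro k hk
        simp only [Function.comp_apply, Nat.succ_eq_add_one, zero_add]
        have e1 : ((k + 1 : Nat) : Int) + 1 = ((k + 2 : Nat) : Int) := by push_cast; ring
        have e2 : ((k : Nat) : Int) + 1 = ((k + 1 : Nat) : Int) := by push_cast; ring
        rw [e1, e2, PySem.List.pyGetD_natCast, PySem.List.pyGetD_natCast,
          PySem.List.pyGetD_natCast, PySem.List.pyGetD_natCast]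
        rfl

-- extending the current group up to the boundary jN, then cutting there
theorem pvExtend (ls : List String) (cs : Int) (i jN : Nat) (hjn : jN ≤ ls.length) (hij : i < jN)
    (hfit : i + 1 < jN → pvS ls jN ≤ pvS ls i + cs)
    (hcut : jN < ls.length → pvS ls (jN + 1) > pvS ls i + cs)
    (tail : List (List String))
    (htail : ∀ _h : jN < ls.length, pvCont cs (ls.drop (jN + 1)) [ls[jN]] (pvL ls[jN]) = tail)
    (htail0 : jN = ls.length → tail = []) :
    ∀ (e m : Nat), jN - m ≤ e → i < m → m ≤ jN →
      pvCont cs (ls.drop m) ((ls.drop i).take (m - i)) (pvS ls m - pvS ls i)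
        = (ls.drop i).take (jN - i) :: tail := by
  intro e
  induction e with
  | zero =>
    intro m he him hmj
    have hmeq : m = jN := by omega
    subst hmeq
    by_cases hlt : m < ls.length
    · rw [List.drop_eq_getElem_cons hlt]
      have hne : (ls.drop i).take (m - i) ≠ [] := by
        have : ((ls.drop i).take (m - i)).length = min (m - i) (ls.length - i) := by simp
        intro hcon; rw [hcon] at this; simp at this; omega
      have harith : pvS ls m - pvS ls i + PySem.Str.len ls[m] + 1 > cs := by
        have := pvS_succ ls m hlt
        have := hcut hlt
        simp only [pvL] at *; omega
      simp only [pvCont, if_pos (And.intro hne harith)]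
      rw [show (PySem.Str.len ls[m] + 1) = pvL ls[m] from rfl, htail hlt]
    · have hje : m = ls.length := by omega
      rw [List.drop_of_length_le (by omega), htail0 hje]
      simp [pvCont]
  | succ e ih =>
    intro m he him hmj
    by_cases hmeq : m = jN
    · subst hmeq
      by_cases hlt : m < ls.length
      · rw [List.drop_eq_getElem_cons hlt]
        have hne : (ls.drop i).take (m - i) ≠ [] := by
          have : ((ls.drop i).take (m - i)).length = min (m - i) (ls.length - i) := by simp
          intro hcon; rw [hcon] at this; simp at this; omega
        have harith : pvS ls m - pvS ls i + PySem.Str.len ls[m] + 1 > cs := by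
          have := pvS_succ ls m hlt
          have := hcut hlt
          simp only [pvL] at *; omega
        simp only [pvCont, if_pos (And.intro hne harith)]
        rw [show (PySem.Str.len ls[m] + 1) = pvL ls[m] from rfl, htail hlt]
      · have hje : m = ls.length := by omega
        rw [List.drop_of_length_le (by omega), htail0 hje]
        simp [pvCont]
    · -- m < jN : the next line still fits, extend the group
      have hmlt : m < ls.length := by omega
      rw [List.drop_eq_getElem_cons hmlt]
      have hfits : ¬ ((ls.drop i).take (m - i) ≠ [] ∧ pvS ls m - pvS ls i + PySem.Str.len ls[m] + 1 > cs) := by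
        have h1 := pvS_succ ls m hmlt
        have h2 := pvS_mono ls (m + 1) jN (by omega)
        have h3 := hfit (by omega)
        intro hcon
        simp only [pvL] at *
        omega
      simp only [pvCont, if_neg hfits]
      have hgrow : (ls.drop i).take (m - i) ++ [ls[m]] = (ls.drop i).take (m + 1 - i) := by
        have hsub : m + 1 - i = (m - i) + 1 := by omega
        rw [hsub, List.take_add_one, List.getElem?_drop,
          show i + (m - i) = m from by omega, List.getElem?_eq_getElem hmlt]
        rfl
      have harith2 : pvS ls m - pvS ls i + PySem.Str.len ls[m] + 1 = pvS ls (m + 1) - pvS ls i := by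
        have := pvS_succ ls m hmlt
        simp only [pvL] at *; omega
      rw [hgrow]
      rw [show pvS ls m - pvS ls i + PySem.Str.len ls[m] + 1 = pvS ls (m + 1) - pvS ls i from harith2]
      exact ih (m + 1) (by omega) (by omega) (by omega)

-- the whole grouping: recursion over boundaries = the greedy recursion
theorem pvMain (ls : List String) (cs : Int) : ∀ (d i : Nat), ls.length - i ≤ d → i < ls.length →
    pvCont cs (ls.drop (i + 1)) ((ls.drop i).take 1) (pvS ls (i + 1) - pvS ls i)
      = pvSlices ls ((i : Int) :: pvBoundsLoop (pvPrefix ls) cs (ls.length : Int) (i : Int)) := by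
  intro d
  induction d using Nat.strong_induction_on with
  | _ d ih =>
    intro i hd hi
    have mono : ∀ a b : Int, 0 ≤ a → a ≤ b → b < ((pvPrefix ls).length : Int) →
        PySem.List.pyGetD (pvPrefix ls) a 0 ≤ PySem.List.pyGetD (pvPrefix ls) b 0 := by
      intro a b ha hab hb
      rw [pvPrefix_len] at hb
      rw [show a = ((a.toNat : Nat) : Int) from (Int.toNat_of_nonneg ha).symm,
        show b = ((b.toNat : Nat) : Int) from (Int.toNat_of_nonneg (by omega)).symm,
        pvPrefix_get ls a.toNat (by omega), pvPrefix_get ls b.toNat (by omega)]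
      exact pvS_mono ls a.toNat b.toNat (by omega)
    have hget : PySem.List.pyGetD (pvPrefix ls) (i : Int) 0 = pvS ls i :=
      pvPrefix_get ls i (le_of_lt hi)
    set limit := PySem.List.pyGetD (pvPrefix ls) (i : Int) 0 + cs with hlim
    set jI := pvBSearch (pvPrefix ls) limit ((i : Int) + 1) (ls.length : Int) with hjI
    have hbnds := pvBSearch_bounds (pvPrefix ls) limit ((i : Int) + 1) (ls.length : Int) (by omega)
    have hmax := pvBSearch_max (pvPrefix ls) limit mono ((i : Int) + 1) (ls.length : Int)
      (by omega) (by omega) (by rw [pvPrefix_len]; push_cast; omega)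
    rw [← hjI] at hbnds hmax
    set jN := jI.toNat with hjN
    have hjcast : ((jN : Nat) : Int) = jI := Int.toNat_of_nonneg (by omega)
    have hij : i < jN := by omega
    have hjn : jN ≤ ls.length := by omega
    have hfit : i + 1 < jN → pvS ls jN ≤ pvS ls i + cs := by
      intro hlt
      have h2 := hmax.2 (by omega)
      rw [← hjcast, pvPrefix_get ls jN hjn] at h2
      omega
    have hcut : jN < ls.length → pvS ls (jN + 1) > pvS ls i + cs := by
      intro hlt
      by_contra hcon
      have := hmax.1 ((jN + 1 : Nat) : Int) (by push_cast; omega) (by push_cast; omega)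
        (by rw [pvPrefix_get ls (jN + 1) (by omega)]; omega)
      omega
    rw [pvBoundsLoop_eq, if_pos (show (i : Int) < (ls.length : Int) by omega)]
    rw [show pvSlices ls ((i : Int) :: jI :: pvBoundsLoop (pvPrefix ls) cs (ls.length : Int) jI)
        = PySem.List.slice ls (some (i : Int)) (some jI)
          :: pvSlices ls (jI :: pvBoundsLoop (pvPrefix ls) cs (ls.length : Int) jI) from rfl]
    rw [← hjcast, PySem.List.slice_natCast]
    by_cases hend : jN < ls.length
    · -- a further chunk follows: its grouping is the induction hypothesis at jN
      have htail : pvCont cs (ls.drop (jN + 1)) [ls[jN]] (pvL ls[jN])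
          = pvSlices ls ((jN : Int) :: pvBoundsLoop (pvPrefix ls) cs (ls.length : Int) (jN : Int)) := by
        have := ih (d - 1) (by omega) jN (by omega) hend
        rw [List.drop_eq_getElem_cons hend] at this
        rw [show ([ls[jN]] : List String) = (ls[jN] :: ls.drop (jN + 1)).take 1 from rfl]
        rw [show pvL ls[jN] = pvS ls (jN + 1) - pvS ls jN from by
          have := pvS_succ ls jN hend; omega]
        exact this
      have := pvExtend ls cs i jN hjn hij hfit hcut _ (fun _ => htail)
        (fun h => absurd h (by omega)) (jN - (i + 1)) (i + 1) (by omega) (by omega) (by omega)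
      rw [show i + 1 - i = 1 from by omega] at this
      rw [this, hjcast]
    · -- jN = ls.length : last chunk, the loop stops
      have hje : jN = ls.length := by omega
      rw [show pvBoundsLoop (pvPrefix ls) cs (ls.length : Int) ((jN : Nat) : Int) = [] from by
        rw [pvBoundsLoop_eq, if_neg (by omega)]]
      rw [show pvSlices ls [((jN : Nat) : Int)] = [] from rfl]
      have := pvExtend ls cs i jN hjn hij hfit hcut [] (fun h => absurd h (by omega))
        (fun _ => rfl) (jN - (i + 1)) (i + 1) (by omega) (by omega) (by omega)
      rw [show i + 1 - i = 1 from by omega] at this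
      exact this

-- ===== VERDICT (by name: the statement is the Claim_ definition above) =====
-- the nil-lines case: both programs return []
theorem pv_nil_case (cs : Int) :
    pvBoundsLoop (pvPrefix ([] : List String)) cs (0 : Int) 0 = [] := by
  rw [pvBoundsLoop_eq]; simp

theorem split_large_block_py_eq (block : String) (chunk_size : Int) :
    split_large_block_py block chunk_size = split_large_block_py_alt block chunk_size := by
  simp only [split_large_block_py, split_large_block_py_alt]
  rcases h : (PySem.Str.split? block "\n").getD [] with _ | ⟨l, rest⟩
  · -- lines = [] : both sides are []
    simp only [List.foldl_nil, List.length_nil, Nat.cast_zero, pv_nil_case,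
      List.length_cons]
    norm_num [PySem.List.pyRange_one_eq_nil]
    decide
  · -- lines = l :: rest
    set ls := l :: rest with hlsdef
    -- A's fold through the group-level fold
    rw [show (([], [], 0) : List String × List String × Int)
        = ((([] : List (List String)).map pvRender : List String), ([] : List String), (0 : Int)) from rfl,
      pv_fold_rel chunk_size ls [] [] 0]
    set F := ls.foldl (pvGFstep chunk_size) ([], [], 0) with hF
    have hcur : F.2.1 ≠ [] := pvGF_last_ne chunk_size rest l [] [] 0
    have hG : F.1 ++ [F.2.1] = pvCont chunk_size ls [] 0 := by
      have := pvGF_cont chunk_size ls [] [] 0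
      simpa using this
    -- B's groups are the greedy groups
    have hmain := pvMain ls chunk_size ls.length 0 (by omega) (by simp [hlsdef])
    have hstep : pvCont chunk_size ls [] 0
        = pvCont chunk_size (ls.drop (0 + 1)) ((ls.drop 0).take 1) (pvS ls (0 + 1) - pvS ls 0) := by
      have h1 : pvS ls (0 + 1) - pvS ls 0 = 0 + PySem.Str.len l + 1 := by
        simp [pvS, hlsdef, pvL]
      rw [h1]
      simp [hlsdef, pvCont]
    have hgroups : pvCont chunk_size ls [] 0
        = pvSlices ls ((0 : Int) :: pvBoundsLoop (pvPrefix ls) chunk_size (ls.length : Int) (0 : Int)) := by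
      rw [hstep, hmain]; norm_num
    rw [pvSlices_map ls (0 :: pvBoundsLoop (pvPrefix ls) chunk_size (ls.length : Int) 0)]
    rw [← hgroups, ← hG]
    rw [PySem.List.slice_to_neg_one, List.dropLast_concat,
      PySem.List.pyGetD_neg_one (F.1 ++ [F.2.1]) [] (by simp), List.getLast_concat]
    rw [if_pos hcur]
    simp only [pvRender]

-- ===== VERDICT (by name: the statement is the Claim_ definition above) =====
theorem split_large_block_py_spec : Claim_equal_split_large_block_py := by
  intro block chunk_size _
  unfold Spec_split_large_block_py
  exact split_large_block_py_eq block chunk_size
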